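-- pv_equiv track=rewrite | github.com/vahidturing/rlhf-llmchekcks | main.py | get_lines_containing
-- ===== SOURCE A (Python) =====
-- def get_lines_containing(input_string, word_list):
--     lines = input_string.splitlines()
--
--     matching_lines = [
--         line for line in lines
--         if any(word in line for word in word_list)
--     ]
--
--     result = "\n".join(matching_lines)
--     if result:
--         result += "\n"
--
--     return result
-- ===== SOURCE B (Python) =====
-- def _matches(line, word_list):
--     # scan positions of the line once; at each position check whether a word starts there
--     for i in range(len(line) + 1):
--         for w in word_list:
--             if line.startswith(w, i):
--                 return True
--     return False
--
--
-- def get_lines_containing(input_string, word_list):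
--     res = ""
--     for line in input_string.splitlines():
--         if _matches(line, word_list):
--             res += line + "\n"
--     return res
-- ===== Notes on version B (the rewrite author's own statement) =====
-- stated objective: alternative
-- what changed: A's per-word substring searches, list-comprehension filter and '\n'.join with a conditional trailing newline are replaced by a single left-to-right position scan of each line (checking whether any word starts at each offset) and direct accumulation of line+'\n' into the output, so join and the truthiness check disappear.
-- intended difference: When '' is in word_list and the input is a single empty line (splitlines == ['']), A returns '' because its truthiness check on the joined string drops the one kept empty line, while B returns '\n', the intended output: one matching line kept and newline-terminated. — e.g. on get_lines_containing("\n", [""]): A returns "", B returns "\n"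
import Mathlib
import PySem

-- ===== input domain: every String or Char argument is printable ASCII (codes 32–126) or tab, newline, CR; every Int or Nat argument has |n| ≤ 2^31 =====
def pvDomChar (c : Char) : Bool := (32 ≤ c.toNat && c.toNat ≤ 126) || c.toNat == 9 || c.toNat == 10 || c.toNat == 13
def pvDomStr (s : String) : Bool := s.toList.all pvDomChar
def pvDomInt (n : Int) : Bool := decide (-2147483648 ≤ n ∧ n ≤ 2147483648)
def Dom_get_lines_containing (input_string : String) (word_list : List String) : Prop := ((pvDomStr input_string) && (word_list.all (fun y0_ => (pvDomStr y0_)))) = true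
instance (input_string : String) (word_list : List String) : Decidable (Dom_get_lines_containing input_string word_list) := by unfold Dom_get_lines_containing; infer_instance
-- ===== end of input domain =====

-- B replaces A's per-word substring searches + "\n".join + conditional trailing newline by a single
-- position scan per line (checking whether any word starts at each offset) that appends line+"\n"
-- directly to the accumulated output (objective: alternative decomposition, same cost).

-- ===== PORT A =====
def get_lines_containing (input_string : String) (word_list : List String) : String :=
  let lines := PySem.Chars.splitlines input_string.toList
  let matching_lines := lines.filter (fun line => word_list.any (fun word => PySem.Chars.isIn word.toList line))
  let result := PySem.Chars.join ['\n'] matching_lines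
  String.ofList (if result = [] then result else result ++ ['\n'])

-- ===== PORT B =====
-- B's helper _matches: scan positions of the line; at each position, does some word start there?
def pvAltMatch (line : List Char) (word_list : List String) : Bool :=
  (List.range (line.length + 1)).any (fun i =>
    word_list.any (fun w => PySem.Chars.startswith (line.drop i) w.toList))

def get_lines_containing_alt (input_string : String) (word_list : List String) : String :=
  String.ofList ((PySem.Chars.splitlines input_string.toList).foldl
    (fun res line => if pvAltMatch line word_list then res ++ (line ++ ['\n']) else res) [])

-- ===== PRECONDITION & SPEC =====
-- When "" is in word_list and the input is a single empty line (splitlines = [""]), A returns ""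
-- (its truthiness check on the joined string drops the one kept empty line) while B returns "\n",
-- the intended output: one matching line, kept and newline-terminated.
def D_get_lines_containing (input_string : String) (word_list : List String) : Prop :=
  "" ∈ word_list ∧ PySem.Chars.splitlines input_string.toList = [[]]
instance (input_string : String) (word_list : List String) : Decidable (D_get_lines_containing input_string word_list) := by unfold D_get_lines_containing; infer_instance

def Spec_get_lines_containing (input_string : String) (word_list : List String) (out : String) : Prop := ¬ D_get_lines_containing input_string word_list → out = get_lines_containing_alt input_string word_list
instance (input_string : String) (word_list : List String) (out : String) : Decidable (Spec_get_lines_containing input_string word_list out) := by unfold Spec_get_lines_containing; infer_instance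

def pvDiffWitness_get_lines_containing : String × List String := ("\n", [""])
def pvDiffWitnessOut_get_lines_containing : String × String := ("", "\n")

-- ===== CLAIM (what is proved, stated in full; the proofs are below) =====
def Claim_unchanged_get_lines_containing : Prop := ∀ (input_string : String) (word_list : List String), Dom_get_lines_containing input_string word_list → Spec_get_lines_containing input_string word_list (get_lines_containing input_string word_list)
def Claim_changed_get_lines_containing : Prop := Dom_get_lines_containing (pvDiffWitness_get_lines_containing.1) (pvDiffWitness_get_lines_containing.2) ∧ D_get_lines_containing (pvDiffWitness_get_lines_containing.1) (pvDiffWitness_get_lines_containing.2) ∧ get_lines_containing (pvDiffWitness_get_lines_containing.1) (pvDiffWitness_get_lines_containing.2) = pvDiffWitnessOut_get_lines_containing.1 ∧ get_lines_containing_alt (pvDiffWitness_get_lines_containing.1) (pvDiffWitness_get_lines_containing.2) = pvDiffWitnessOut_get_lines_containing.2 ∧ pvDiffWitnessOut_get_lines_containing.1 ≠ pvDiffWitnessOut_get_lines_containing.2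
def Claim_exact_get_lines_containing : Prop := ∀ (input_string : String) (word_list : List String), Dom_get_lines_containing input_string word_list → D_get_lines_containing input_string word_list → get_lines_containing input_string word_list ≠ get_lines_containing_alt input_string word_list

-- ===== LEMMAS AND PROOFS =====

-- A's match test (any word is a substring) equals B's match test (some word starts at some position).
theorem pvMatch_eq (line : List Char) (word_list : List String) :
    word_list.any (fun word => PySem.Chars.isIn word.toList line) = pvAltMatch line word_list := by
  rcases h : pvAltMatch line word_list with _ | _
  · -- B false → A false
    simp only [pvAltMatch, List.any_eq_false] at h ⊢
    intro w hw hIn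
    obtain ⟨j, hj⟩ := (PySem.Chars.exists_prefix_drop_iff_isIn _ _).mpr hIn
    rcases le_or_gt j line.length with hle | hgt
    · exact (h j (by simpa using Nat.lt_succ_of_le hle))
        (List.any_eq_true.mpr ⟨w, hw, by rw [PySem.Chars.startswith_iff]; exact hj⟩)
    · have hnil : line.drop j = [] := List.drop_eq_nil_of_le (le_of_lt hgt)
      have hw0 : w.toList = [] := List.prefix_nil.mp (hnil ▸ hj)
      exact (h line.length (by simp))
        (List.any_eq_true.mpr ⟨w, hw,
          by rw [PySem.Chars.startswith_iff, hw0]; exact List.nil_prefix⟩)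
  · -- B true → A true
    simp only [pvAltMatch, List.any_eq_true] at h ⊢
    obtain ⟨i, _, w, hw, hsw⟩ := h
    refine ⟨w, hw, ?_⟩
    rw [← PySem.Chars.exists_prefix_drop_iff_isIn]
    exact ⟨i, (PySem.Chars.startswith_iff _ _).mp hsw⟩

-- B's accumulating loop flattens to the newline-terminated matching lines.
theorem pvFold_eq (p : List Char → Bool) (lines : List (List Char)) (acc : List Char) :
    lines.foldl (fun res line => if p line then res ++ (line ++ ['\n']) else res) acc
      = acc ++ ((lines.filter p).map (· ++ ['\n'])).flatten := by
  induction lines generalizing acc with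
  | nil => simp
  | cons a t ih =>
    by_cases hp : p a
    · simp [List.foldl_cons, hp, ih, List.append_assoc]
    · simp [List.foldl_cons, hp, ih]

-- join with "\n" followed by a trailing "\n" equals flattening the newline-terminated lines.
theorem pvJoin_cons (b : List Char) (t : List (List Char)) :
    PySem.Chars.join ['\n'] (b :: t) ++ ['\n'] = ((b :: t).map (· ++ ['\n'])).flatten := by
  induction t generalizing b with
  | nil => simp [PySem.Chars.join_singleton]
  | cons c t' ih =>
    calc PySem.Chars.join ['\n'] (b :: c :: t') ++ ['\n']
        = b ++ ['\n'] ++ (PySem.Chars.join ['\n'] (c :: t') ++ ['\n']) := by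
          rw [PySem.Chars.join_cons_cons]; simp [List.append_assoc]
      _ = b ++ ['\n'] ++ ((List.map (· ++ ['\n']) (c :: t')).flatten) := by rw [ih c]
      _ = ((List.map (· ++ ['\n']) (b :: c :: t')).flatten) := by simp [List.append_assoc]

-- A's tail (join + conditional newline) equals B's flattened form, except on the list [""].
theorem pvTail_eq (ls : List (List Char)) (hne : ls ≠ [[]]) :
    (if PySem.Chars.join ['\n'] ls = [] then PySem.Chars.join ['\n'] ls
     else PySem.Chars.join ['\n'] ls ++ ['\n'])
      = (ls.map (· ++ ['\n'])).flatten := by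
  match ls with
  | [] => simp [PySem.Chars.join_nil]
  | [x] =>
    have hx : x ≠ [] := by intro h; exact hne (by rw [h])
    rw [PySem.Chars.join_singleton, if_neg hx]
    simp
  | a :: b :: t =>
    rw [PySem.Chars.join_cons_cons, if_neg (by simp)]
    have := pvJoin_cons a (b :: t)
    rw [PySem.Chars.join_cons_cons] at this
    simpa [List.append_assoc] using this

theorem pvToList_empty (w : String) (h : w.toList = []) : w = "" := by
  cases w; simp_all

-- If "" ∈ word_list, every line matches A's test.
theorem pvFilter_all (word_list : List String) (hw : "" ∈ word_list) (lines : List (List Char)) :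
    lines.filter (fun line => word_list.any (fun word => PySem.Chars.isIn word.toList line)) = lines := by
  apply List.filter_eq_self.mpr
  intro l _
  exact List.any_eq_true.mpr ⟨"", hw, by simp [PySem.Chars.isIn_nil]⟩

-- ===== VERDICT (by name: the statement is the Claim_ definition above) =====
theorem get_lines_containing_spec : Claim_unchanged_get_lines_containing := by
  intro input_string word_list _ hD
  unfold get_lines_containing get_lines_containing_alt
  set lines := PySem.Chars.splitlines input_string.toList with hlines
  have hfe : lines.filter (fun line => word_list.any (fun word => PySem.Chars.isIn word.toList line))
      = lines.filter (fun line => pvAltMatch line word_list) := by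
    apply List.filter_congr; intro l _; exact pvMatch_eq l word_list
  set ls := lines.filter (fun line => word_list.any (fun word => PySem.Chars.isIn word.toList line)) with hls
  have hne : ls ≠ [[]] := by
    intro hcontra
    have hmem : ([] : List Char) ∈ ls := by rw [hcontra]; exact List.mem_singleton.mpr rfl
    rw [hls, List.mem_filter] at hmem
    obtain ⟨hmemlines, hpred⟩ := hmem
    obtain ⟨w, hw, hIn⟩ := List.any_eq_true.mp hpred
    have hw0 : w = "" := by
      apply pvToList_empty
      have := (PySem.Chars.isIn_iff_infix _ _).mp hIn
      exact List.infix_nil.mp this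
    have hwl : "" ∈ word_list := hw0 ▸ hw
    apply hD
    refine ⟨hwl, ?_⟩
    rw [← hlines, ← pvFilter_all word_list hwl lines, ← hls, hcontra]
  rw [pvFold_eq, ← hfe, List.nil_append, ← pvTail_eq ls hne]

theorem get_lines_containing_changed : Claim_changed_get_lines_containing := by
  unfold Claim_changed_get_lines_containing; decide

theorem get_lines_containing_tight : Claim_exact_get_lines_containing := by
  intro input_string word_list _ hD
  obtain ⟨hw, hsl⟩ := hD
  have hB : pvAltMatch [] word_list = true := by
    rw [← pvMatch_eq]
    exact List.any_eq_true.mpr ⟨"", hw, by simp [PySem.Chars.isIn_nil]⟩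
  simp only [get_lines_containing, get_lines_containing_alt, hsl,
    pvFilter_all word_list hw, PySem.Chars.join_singleton, List.foldl_cons, List.foldl_nil,
    hB, if_pos, List.nil_append]
  decide
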